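-- pv_equiv track=rewrite | github.com/tsilva/.github | src/gitguard/rules/gitignore.py | _strip_managed_blocks
-- ===== SOURCE A (Python) =====
-- _MANAGED_HEADER = "# Managed by tsilva/.github"
--
-- def _strip_managed_blocks(content: str) -> str:
--     """Return content with all managed block(s) removed, trailing blank lines stripped."""
--     lines = []
--     in_managed = False
--     for line in content.splitlines():
--         if line.strip() == _MANAGED_HEADER:
--             in_managed = True
--             continue
--         if in_managed:
--             continue
--         lines.append(line)
--     while lines and not lines[-1].strip():
--         lines.pop()
--     return "\n".join(lines) + "\n" if lines else ""
-- ===== SOURCE B (Python) =====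
-- _MANAGED_HEADER = "# Managed by tsilva/.github"
--
-- def _strip_managed_blocks(content: str) -> str:
--     """Return content with all managed block(s) removed, trailing blank lines stripped."""
--     lines = content.splitlines()
--     # cut = index of the first managed header line (everything from there on is dropped,
--     # since A's flag is never reset), or len(lines) if there is none
--     cut = len(lines)
--     for i, line in enumerate(lines):
--         if line.strip() == _MANAGED_HEADER:
--             cut = i
--             break
--     # move cut back past trailing blank lines
--     while cut and not lines[cut - 1].strip():
--         cut -= 1
--     return "".join(line + "\n" for line in lines[:cut])
-- ===== Notes on version B (the rewrite author's own statement) =====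
-- stated objective: simpler
-- what changed: Replaces the never-reset boolean flag and list mutation (append + pop-while) with a single cut index: the index of the first managed-header line, moved back past trailing blank lines, then one join over the prefix.
import Mathlib
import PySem

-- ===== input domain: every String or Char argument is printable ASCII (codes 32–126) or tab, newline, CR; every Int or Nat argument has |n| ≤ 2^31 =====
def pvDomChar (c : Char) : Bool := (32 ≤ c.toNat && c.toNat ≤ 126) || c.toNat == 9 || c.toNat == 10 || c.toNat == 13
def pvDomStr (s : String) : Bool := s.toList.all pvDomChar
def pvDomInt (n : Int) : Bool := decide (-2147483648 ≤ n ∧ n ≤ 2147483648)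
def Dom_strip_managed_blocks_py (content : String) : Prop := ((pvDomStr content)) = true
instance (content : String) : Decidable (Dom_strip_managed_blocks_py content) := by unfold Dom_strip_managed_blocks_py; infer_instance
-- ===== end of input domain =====

-- B is the same task by a different decomposition (a cut index instead of a flag plus
-- list mutation); same return value, no speed claim.

def pvHeader : String := "# Managed by tsilva/.github"

-- ===== PORT A =====
-- 'while lines and not lines[-1].strip(): lines.pop()' as structural recursion on the reversed list
def stripA_popRev : List String → List String
  | [] => []
  | l :: rest => if PySem.Str.strip l == "" then stripA_popRev rest else l :: rest

def strip_managed_blocks_py (content : String) : String :=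
  let st := (PySem.Str.splitlines content).foldl
    (fun (st : List String × Bool) line =>
      if PySem.Str.strip line == pvHeader then (st.1, true)
      else if st.2 then st
      else (st.1 ++ [line], st.2)) ([], false)
  let lines := (stripA_popRev st.1.reverse).reverse
  if lines.isEmpty then "" else PySem.Str.join "\n" lines ++ "\n"

-- ===== PORT B =====
-- 'for i, line in enumerate(lines): if …: cut = i; break' (else cut = len(lines))
def stripB_findCut : List String → Nat
  | [] => 0
  | l :: rest => if PySem.Str.strip l == pvHeader then 0 else stripB_findCut rest + 1

-- 'while cut and not lines[cut-1].strip(): cut -= 1'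
def stripB_trim (lines : List String) : Nat → Nat
  | 0 => 0
  | n + 1 => if PySem.Str.strip (lines.getD n "") == "" then stripB_trim lines n else n + 1

def strip_managed_blocks_py_alt (content : String) : String :=
  let lines := PySem.Str.splitlines content
  let cut := stripB_trim lines (stripB_findCut lines)
  (lines.take cut).foldl (fun acc l => acc ++ l ++ "\n") ""

-- ===== PRECONDITION & SPEC =====
def Spec_strip_managed_blocks_py (content : String) (out : String) : Prop := out = strip_managed_blocks_py_alt content
instance (content : String) (out : String) : Decidable (Spec_strip_managed_blocks_py content out) := by unfold Spec_strip_managed_blocks_py; infer_instance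

-- ===== CLAIM (what is proved, stated in full; the proofs are below) =====
def Claim_equal_strip_managed_blocks_py : Prop := ∀ (content : String), Dom_strip_managed_blocks_py content → Spec_strip_managed_blocks_py content (strip_managed_blocks_py content)

-- ===== LEMMAS AND PROOFS =====

-- A's fold, once the flag is set, never changes the accumulated lines
theorem stripA_fold_true (ls : List String) (acc : List String) :
    (ls.foldl (fun (st : List String × Bool) line =>
      if PySem.Str.strip line == pvHeader then (st.1, true)
      else if st.2 then st
      else (st.1 ++ [line], st.2)) (acc, true)).1 = acc := by
  induction ls generalizing acc with
  | nil => rfl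
  | cons l rest ih =>
    simp only [List.foldl]
    split_ifs <;> exact ih acc

-- A's fold keeps exactly the prefix before the first header line
theorem stripA_fold_eq (ls : List String) (acc : List String) :
    (ls.foldl (fun (st : List String × Bool) line =>
      if PySem.Str.strip line == pvHeader then (st.1, true)
      else if st.2 then st
      else (st.1 ++ [line], st.2)) (acc, false)).1 = acc ++ ls.take (stripB_findCut ls) := by
  induction ls generalizing acc with
  | nil => simp
  | cons l rest ih =>
    simp only [List.foldl, stripB_findCut]
    split_ifs with h h2
    · simpa using stripA_fold_true rest acc
    · simp at h2
    · simpa using ih (acc ++ [l])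

-- stripB_trim only looks at indices below its argument
theorem stripB_trim_take (lines : List String) (c n : Nat) (h : n ≤ c) :
    stripB_trim (lines.take c) n = stripB_trim lines n := by
  induction n with
  | zero => rfl
  | succ m ih =>
    have hm : m < c := h
    have : (lines.take c).getD m "" = lines.getD m "" := by
      simp [List.getD, hm]
    simp only [stripB_trim, this]
    split_ifs <;> simp [ih (Nat.le_of_lt hm)]

theorem stripB_findCut_le (ls : List String) : stripB_findCut ls ≤ ls.length := by
  induction ls with
  | nil => simp [stripB_findCut]
  | cons l rest ih => simp only [stripB_findCut, List.length_cons]; split_ifs <;> omega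

theorem stripB_trim_le (lines : List String) (n : Nat) : stripB_trim lines n ≤ n := by
  induction n with
  | zero => simp [stripB_trim]
  | succ m ih => simp only [stripB_trim]; split_ifs <;> omega

-- the pop-while loop on ys equals taking the trimmed prefix
theorem stripA_pop_eq (ys : List String) :
    (stripA_popRev ys.reverse).reverse = ys.take (stripB_trim ys ys.length) := by
  induction ys using List.reverseRecOn with
  | nil => rfl
  | append_singleton zs l ih =>
    have hget : (zs ++ [l]).getD zs.length "" = l := by
      simp [List.getD]
    have hlen : (zs ++ [l]).length = zs.length + 1 := by simp
    rw [hlen]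
    simp only [stripB_trim, hget, List.reverse_append, List.reverse_cons, List.reverse_nil,
      List.nil_append, List.cons_append, stripA_popRev]
    by_cases hb : PySem.Str.strip l == ""
    · have htr : stripB_trim (zs ++ [l]) zs.length = stripB_trim zs zs.length := by
        have := stripB_trim_take (zs ++ [l]) zs.length zs.length le_rfl
        simpa [List.take_left] using this.symm
      have hle : stripB_trim zs zs.length ≤ zs.length := by
        clear htr ih
        induction zs.length with
        | zero => simp [stripB_trim]
        | succ m ihm =>
          simp only [stripB_trim]
          split_ifs
          · omega
          · omega
      simp [hb, htr, ih, List.take_append_of_le_length hle]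
    · simp [hb, List.take_of_length_le (by simp : (zs ++ [l]).length ≤ zs.length + 1)]

-- joining with '\n' then appending '\n' = concatenating each line + '\n' (nonempty case), over char lists
theorem join_flat (css : List (List Char)) (h : css ≠ []) :
    PySem.Chars.join ['\n'] css ++ ['\n'] = css.flatMap (fun cs => cs ++ ['\n']) := by
  induction css with
  | nil => exact absurd rfl h
  | cons a rest ih =>
    cases rest with
    | nil => simp [PySem.Chars.join_singleton]
    | cons b r =>
      rw [PySem.Chars.join_cons_cons]
      simp only [List.flatMap_cons] at ih ⊢
      rw [← ih (by simp)]
      simp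
      
-- B's string fold, on toList
theorem foldB_toList (ks : List String) (s : String) :
    (ks.foldl (fun acc l => acc ++ l ++ "\n") s).toList
      = s.toList ++ ks.flatMap (fun l => l.toList ++ ['\n']) := by
  induction ks generalizing s with
  | nil => simp
  | cons k rest ih =>
    simp only [List.foldl, List.flatMap_cons, ih]
    simp [String.toList_append]

theorem final_eq (ks : List String) :
    (if ks.isEmpty then "" else PySem.Str.join "\n" ks ++ "\n")
      = ks.foldl (fun acc l => acc ++ l ++ "\n") "" := by
  apply String.ext
  cases ks with
  | nil => simp
  | cons a rest =>
    simp only [List.isEmpty_cons, if_neg (by simp : ¬ false = true)]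
    rw [foldB_toList]
    simp only [String.toList_append, PySem.Str.toList_join]
    have := join_flat ((a :: rest).map String.toList) (by simp)
    simp only [List.flatMap_map] at this
    simpa using this

-- ===== VERDICT (by name: the statement is the Claim_ definition above) =====
theorem strip_managed_blocks_py_spec : Claim_equal_strip_managed_blocks_py := by
  intro content _
  unfold Spec_strip_managed_blocks_py
  simp only [strip_managed_blocks_py, strip_managed_blocks_py_alt]
  set lines := PySem.Str.splitlines content with hl
  clear hl
  rw [stripA_fold_eq lines [], List.nil_append, stripA_pop_eq,
      List.length_take, Nat.min_eq_left (stripB_findCut_le lines),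
      stripB_trim_take lines (stripB_findCut lines) (stripB_findCut lines) le_rfl,
      List.take_take, Nat.min_eq_left (stripB_trim_le lines (stripB_findCut lines))]
  exact final_eq _
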